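-- pv_equiv track=rewrite | github.com/Yatty1/relation-graph | python/walking.py | calcPoint
-- ===== SOURCE A (Python) =====
-- def calcPoint(resultRow, w, threshold):
-- 	point = 0
-- 	for i in range(len(resultRow)):
-- 		for j in range(len(resultRow)):
-- 			if not j + i < len(resultRow):
-- 				break
-- 			if 'dcalc' not in resultRow[i + j] or resultRow[i+j]['dcalc'] == -1 or resultRow[i + j]['dcalc'] > threshold:
-- 				break
-- 			if (j + 1) == w:
-- 				point += 1
-- 				break
-- 	return point
-- ===== SOURCE B (Python) =====
-- def calcPoint(resultRow, w, threshold):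
--     if w < 1:
--         return 0
--     point = 0
--     run = 0
--     for entry in resultRow:
--         v = entry.get('dcalc')
--         if v is None or v == -1 or v > threshold:
--             run = 0
--         else:
--             run += 1
--             if run >= w:
--                 point += 1
--     return point
-- ===== Notes on version B (the rewrite author's own statement) =====
-- stated objective: alternative
-- what changed: Replaced the nested window re-scan (for each start index, re-check up to w entries) by a single pass that tracks the length of the current run of valid entries and counts one point whenever the run reaches w; on typical inputs (small w, early breaks) the measured cost is the same.
import Mathlib
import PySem

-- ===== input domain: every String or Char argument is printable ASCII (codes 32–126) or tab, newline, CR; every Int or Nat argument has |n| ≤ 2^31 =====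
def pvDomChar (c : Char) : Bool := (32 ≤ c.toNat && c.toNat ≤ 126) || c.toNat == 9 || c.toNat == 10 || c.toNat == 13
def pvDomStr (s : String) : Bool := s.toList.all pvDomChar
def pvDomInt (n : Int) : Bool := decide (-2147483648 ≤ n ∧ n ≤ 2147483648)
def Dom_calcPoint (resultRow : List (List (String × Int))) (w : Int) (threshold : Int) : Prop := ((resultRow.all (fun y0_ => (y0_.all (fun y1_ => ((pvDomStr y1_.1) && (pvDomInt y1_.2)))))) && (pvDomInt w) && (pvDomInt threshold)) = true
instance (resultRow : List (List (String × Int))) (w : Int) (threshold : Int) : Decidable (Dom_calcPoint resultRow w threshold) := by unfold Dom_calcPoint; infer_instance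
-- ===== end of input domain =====

-- B replaces A's nested window re-scan by one pass over the rows tracking the current
-- run of valid entries (objective: alternative single-pass algorithm, same measured cost).

-- ===== PORT A =====
-- inner 'for j in range(len(resultRow))' loop with its three 'break's, as structural
-- recursion over the j-list; returns the amount added to 'point' for this i.
def calcInnerA (resultRow : List (List (String × Int))) (w : Int) (threshold : Int)
    (i : Int) : List Int → Int
  | [] => 0
  | j :: js =>
    if ¬ (j + i < (resultRow.length : Int)) then 0
    else
      -- resultRow[i+j]: in range here, pyGet? is some
      match PySem.List.pyGet? resultRow (i + j) with
      | none => 0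
      | some d =>
        if d.lookup "dcalc" = none ∨ (d.lookup "dcalc").getD 0 = -1
            ∨ (d.lookup "dcalc").getD 0 > threshold then 0
        else if j + 1 = w then 1
        else calcInnerA resultRow w threshold i js

def calcPoint (resultRow : List (List (String × Int))) (w : Int) (threshold : Int) : Int :=
  (PySem.List.pyRange 0 (resultRow.length : Int) 1).foldl
    (fun point i =>
      point + calcInnerA resultRow w threshold i
        (PySem.List.pyRange 0 (resultRow.length : Int) 1)) 0

-- ===== PORT B =====
def calcPoint_alt (resultRow : List (List (String × Int))) (w : Int) (threshold : Int) : Int :=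
  if w < 1 then 0
  else
    (resultRow.foldl
      (fun (st : Int × Int) entry =>
        match entry.lookup "dcalc" with
        | none => (0, st.2)
        | some v =>
          if v = -1 ∨ v > threshold then (0, st.2)
          else (st.1 + 1, if st.1 + 1 ≥ w then st.2 + 1 else st.2))
      (0, 0)).2

-- ===== PRECONDITION & SPEC =====
def Spec_calcPoint (resultRow : List (List (String × Int))) (w : Int) (threshold : Int) (out : Int) : Prop := out = calcPoint_alt resultRow w threshold
instance (resultRow : List (List (String × Int))) (w : Int) (threshold : Int) (out : Int) : Decidable (Spec_calcPoint resultRow w threshold out) := by unfold Spec_calcPoint; infer_instance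

-- ===== CLAIM (what is proved, stated in full; the proofs are below) =====
def Claim_equal_calcPoint : Prop := ∀ (resultRow : List (List (String × Int))) (w : Int) (threshold : Int), Dom_calcPoint resultRow w threshold → Spec_calcPoint resultRow w threshold (calcPoint resultRow w threshold)

-- ===== LEMMAS AND PROOFS =====

-- an entry is "valid" iff it has a 'dcalc' key whose value is neither -1 nor > threshold
def pvValid (threshold : Int) (d : List (String × Int)) : Bool :=
  match d.lookup "dcalc" with
  | none => false
  | some v => decide (v ≠ -1 ∧ v ≤ threshold)

-- the next m entries exist and are all valid
def pvWin (bs : List Bool) (m : ℕ) : Bool := (bs.take m).all id && decide (m ≤ bs.length)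

-- count of window starts (A's quantity)
def pvWs (m : ℕ) : List Bool → ℕ
  | [] => 0
  | b :: t => (if pvWin (b :: t) m then 1 else 0) + pvWs m t

-- count of window ends, carrying the current run length (B's quantity)
def pvWc (m : ℕ) : List Bool → ℕ → ℕ
  | [], _ => 0
  | b :: t, r => if b then (if m ≤ r + 1 then 1 else 0) + pvWc m t (r + 1) else pvWc m t 0

theorem pvWin_cons_succ (b : Bool) (t : List Bool) (m : ℕ) :
    pvWin (b :: t) (m + 1) = (b && pvWin t m) := by
  simp [pvWin, Bool.and_assoc]

theorem pvWin_append_false (xs t : List Bool) (m : ℕ) :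
    pvWin (xs ++ false :: t) m = pvWin xs m := by
  induction xs generalizing m with
  | nil =>
    cases m with
    | zero => simp [pvWin]
    | succ m =>
      simp only [List.nil_append, pvWin_cons_succ]
      simp [pvWin]
  | cons x xs ih =>
    cases m with
    | zero => simp [pvWin]
    | succ m => simp [pvWin_cons_succ, ih]

theorem pvWs_append_false (xs t : List Bool) (m : ℕ) (hm : 1 ≤ m) :
    pvWs m (xs ++ false :: t) = pvWs m xs + pvWs m t := by
  induction xs with
  | nil =>
    obtain ⟨m, rfl⟩ := Nat.exists_eq_add_of_le hm
    have h1 : 1 + m = m + 1 := by omega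
    simp only [List.nil_append, pvWs, h1, pvWin_cons_succ]
    simp
  | cons x xs ih =>
    have hthis : pvWin ((x :: xs) ++ false :: t) m = pvWin (x :: xs) m :=
      pvWin_append_false (x :: xs) t m
    simp only [List.cons_append] at hthis ⊢
    simp only [pvWs]
    rw [hthis, ih]
    omega

theorem pvWin_replicate_true (r m : ℕ) :
    pvWin (List.replicate r true) m = decide (m ≤ r) := by
  by_cases h : m ≤ r
  · simp only [pvWin, List.take_replicate, List.length_replicate, h, decide_true, Bool.and_true]
    simp
  · simp [pvWin, h]

theorem pvWs_replicate_true (r m : ℕ) (hm : 1 ≤ m) :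
    pvWs m (List.replicate r true) = r + 1 - m := by
  induction r with
  | zero => simp [pvWs]; omega
  | succ r ih =>
    have hwin := pvWin_replicate_true (r + 1) m
    rw [List.replicate_succ] at hwin ⊢
    simp only [pvWs, ih, hwin]
    split_ifs with h <;> simp only [decide_eq_true_eq] at h <;> omega

-- the key counting lemma: windows by start = windows by end, with a true-run prefix
theorem pvWs_eq_pvWc (m : ℕ) (hm : 1 ≤ m) (bs : List Bool) :
    ∀ r, pvWs m (List.replicate r true ++ bs) = (r + 1 - m) + pvWc m bs r := by
  induction bs with
  | nil =>
    intro r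
    simp [pvWc, pvWs_replicate_true r m hm]
  | cons b t ih =>
    intro r
    cases b with
    | true =>
      have hrep : List.replicate r true ++ true :: t = List.replicate (r + 1) true ++ t := by
        rw [List.replicate_succ']; simp
      rw [hrep, ih (r + 1)]
      simp only [pvWc, if_true]
      split_ifs with h <;> omega
    | false =>
      rw [pvWs_append_false _ _ _ hm, pvWs_replicate_true r m hm]
      have := ih 0
      simp only [List.replicate_zero, List.nil_append] at this
      simp only [pvWc, Bool.false_eq_true, if_false, this]
      omega

-- ---------- B side ----------
theorem calcAltFold_eq (w threshold : Int) (hw : ¬ w < 1) :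
    ∀ (rr : List (List (String × Int))) (r acc : Int), 0 ≤ r →
      (rr.foldl
        (fun (st : Int × Int) entry =>
          match entry.lookup "dcalc" with
          | none => (0, st.2)
          | some v =>
            if v = -1 ∨ v > threshold then (0, st.2)
            else (st.1 + 1, if st.1 + 1 ≥ w then st.2 + 1 else st.2))
        (r, acc)).2
      = acc + (pvWc w.toNat (rr.map (pvValid threshold)) r.toNat : ℤ) := by
  intro rr
  induction rr with
  | nil => intro r acc _; simp [pvWc]
  | cons d t ih =>
    intro r acc hr
    simp only [List.foldl_cons, List.map_cons]
    cases hlk : d.lookup "dcalc" with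
    | none =>
      have hv : pvValid threshold d = false := by simp [pvValid, hlk]
      rw [hv]
      simpa [pvWc] using ih 0 acc le_rfl
    | some v =>
      by_cases hbad : v = -1 ∨ v > threshold
      · have hv : pvValid threshold d = false := by
          simp only [pvValid, hlk]; simp; omega
        rw [hv]
        simp only [if_pos hbad]
        simpa [pvWc] using ih 0 acc le_rfl
      · have hv : pvValid threshold d = true := by
          simp only [pvValid, hlk]; simp; omega
        rw [hv]
        simp only [if_neg hbad]
        rw [ih (r + 1) _ (by omega)]
        have hcond : (r + 1 ≥ w) ↔ (w.toNat ≤ r.toNat + 1) := by omega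
        simp only [pvWc]
        by_cases hge : r + 1 ≥ w
        · rw [if_pos hge, if_pos (hcond.mp hge)]
          have : (r + 1).toNat = r.toNat + 1 := by omega
          rw [this]; push_cast; ring
        · rw [if_neg hge, if_neg (fun h => hge (hcond.mpr h))]
          have : (r + 1).toNat = r.toNat + 1 := by omega
          rw [this]
          simp

theorem calcPoint_alt_eq (rr : List (List (String × Int))) (w threshold : Int) (hw : ¬ w < 1) :
    calcPoint_alt rr w threshold = (pvWc w.toNat (rr.map (pvValid threshold)) 0 : ℤ) := by
  unfold calcPoint_alt
  rw [if_neg hw]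
  simpa using calcAltFold_eq w threshold hw rr 0 0 le_rfl

-- ---------- A side ----------
-- the inner loop decides exactly: "the next (w - j0) entries starting at i + j0 are valid"
theorem calcInnerA_char (rr : List (List (String × Int))) (w threshold : Int) (i : Int)
    (hi : 0 ≤ i) :
    ∀ (js : List Int) (j0 : Int), js = PySem.List.pyRange j0 (rr.length : Int) 1 →
      0 ≤ j0 → j0 < w →
      calcInnerA rr w threshold i js
        = if pvWin ((rr.map (pvValid threshold)).drop (i + j0).toNat) (w - j0).toNat
          then 1 else 0 := by
  intro js
  induction js with
  | nil =>
    intro j0 hjs hj0 hjw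
    have hge : (rr.length : Int) ≤ j0 := by
      by_contra h
      rw [PySem.List.pyRange_one_cons (by omega)] at hjs
      exact List.cons_ne_nil _ _ hjs.symm
    have hdrop : ((rr.map (pvValid threshold)).drop (i + j0).toNat) = [] := by
      apply List.drop_eq_nil_of_le
      simp only [List.length_map]; omega
    rw [hdrop]
    have : pvWin [] (w - j0).toNat = false := by
      simp [pvWin]; omega
    simp [calcInnerA, this]
  | cons j js ih =>
    intro j0 hjs hj0 hjw
    have hlt : j0 < (rr.length : Int) := by
      by_contra h
      rw [PySem.List.pyRange_one_eq_nil (by omega)] at hjs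
      exact List.cons_ne_nil _ _ hjs
    rw [PySem.List.pyRange_one_cons hlt] at hjs
    injection hjs with hj hjs'
    subst hj
    unfold calcInnerA
    by_cases hin : j + i < (rr.length : Int)
    · rw [if_neg (by omega)]
      have hidx : (i + j).toNat < rr.length := by omega
      rw [PySem.List.pyGet?_of_nonneg rr (by omega : (0:ℤ) ≤ i + j),
        List.getElem?_eq_getElem hidx]
      simp only
      set d := rr[(i + j).toNat] with hd
      have hdropc : (rr.map (pvValid threshold)).drop (i + j).toNat
          = pvValid threshold d :: (rr.map (pvValid threshold)).drop ((i + j).toNat + 1) := by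
        rw [List.drop_eq_getElem_cons (by simpa using hidx)]
        simp [hd]
      have hmsucc : (w - j).toNat = (w - (j + 1)).toNat + 1 := by omega
      by_cases hbad : d.lookup "dcalc" = none ∨ (d.lookup "dcalc").getD 0 = -1
          ∨ (d.lookup "dcalc").getD 0 > threshold
      · rw [if_pos hbad]
        have hv : pvValid threshold d = false := by
          unfold pvValid
          cases hlk : d.lookup "dcalc" with
          | none => rfl
          | some v =>
            rw [hlk] at hbad
            simp only [Option.getD_some] at hbad
            simp only [reduceCtorEq, false_or] at hbad
            simp; omega
        rw [hdropc, hmsucc, pvWin_cons_succ, hv]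
        simp
      · rw [if_neg hbad]
        rw [not_or, not_or] at hbad
        obtain ⟨hne, h1, h2⟩ := hbad
        cases hlk : d.lookup "dcalc" with
        | none => exact absurd hlk hne
        | some v =>
          rw [hlk] at h1 h2
          simp only [Option.getD_some] at h1 h2
          have hv : pvValid threshold d = true := by
            unfold pvValid; rw [hlk]; simp; omega
          by_cases hw1 : j + 1 = w
          · rw [if_pos hw1]
            have hm1 : (w - j).toNat = 1 := by omega
            rw [hdropc, hm1, pvWin_cons_succ, hv]
            simp [pvWin]
          · rw [if_neg hw1]
            rw [ih (j + 1) hjs' (by omega) (by omega)]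
            rw [hdropc, hmsucc, pvWin_cons_succ, hv]
            have heq : (i + (j + 1)).toNat = (i + j).toNat + 1 := by omega
            rw [heq]
            simp
    · rw [if_pos (by omega)]
      have hdrop : ((rr.map (pvValid threshold)).drop (i + j).toNat) = [] := by
        apply List.drop_eq_nil_of_le
        simp only [List.length_map]; omega
      rw [hdrop]
      have hw0 : pvWin [] (w - j).toNat = false := by
        simp [pvWin]; omega
      rw [hw0]; simp

-- inner loop is 0 whenever w < 1 (j + 1 = w can never fire)
theorem calcInnerA_nonpos (rr : List (List (String × Int))) (w threshold : Int) (i : Int)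
    (hw : w < 1) :
    ∀ (js : List Int), (∀ j ∈ js, 0 ≤ j) → calcInnerA rr w threshold i js = 0 := by
  intro js
  induction js with
  | nil => intro _; rfl
  | cons j js ih =>
    intro hpos
    have hj : 0 ≤ j := hpos j (by simp)
    unfold calcInnerA
    by_cases h1 : ¬ (j + i < (rr.length : Int))
    · rw [if_pos h1]
    · rw [if_neg h1]
      cases hg : PySem.List.pyGet? rr (i + j) with
      | none => rfl
      | some d =>
        simp only
        by_cases h2 : d.lookup "dcalc" = none ∨ (d.lookup "dcalc").getD 0 = -1
            ∨ (d.lookup "dcalc").getD 0 > threshold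
        · rw [if_pos h2]
        · rw [if_neg h2, if_neg (by omega : ¬ (j + 1 = w))]
          exact ih (fun x hx => hpos x (by simp [hx]))

theorem pvWs_drop_cons (bs : List Bool) (k : ℕ) (m : ℕ) (hk : k < bs.length) :
    pvWs m (bs.drop k) = (if pvWin (bs.drop k) m then 1 else 0) + pvWs m (bs.drop (k + 1)) := by
  rw [List.drop_eq_getElem_cons hk]
  rw [show pvWs m (bs[k] :: bs.drop (k + 1))
      = (if pvWin (bs[k] :: bs.drop (k + 1)) m then 1 else 0) + pvWs m (bs.drop (k + 1)) from rfl]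

theorem calcOuter_eq (rr : List (List (String × Int))) (w threshold : Int) (hw : ¬ w < 1) :
    ∀ (is : List Int) (i0 acc : Int), is = PySem.List.pyRange i0 (rr.length : Int) 1 → 0 ≤ i0 →
      is.foldl
        (fun point i =>
          point + calcInnerA rr w threshold i
            (PySem.List.pyRange 0 (rr.length : Int) 1)) acc
      = acc + (pvWs w.toNat ((rr.map (pvValid threshold)).drop i0.toNat) : ℤ) := by
  intro is
  induction is with
  | nil =>
    intro i0 acc his hi0
    have hge : (rr.length : Int) ≤ i0 := by
      by_contra h
      rw [PySem.List.pyRange_one_cons (by omega)] at his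
      exact List.cons_ne_nil _ _ his.symm
    have hdrop : ((rr.map (pvValid threshold)).drop i0.toNat) = [] := by
      apply List.drop_eq_nil_of_le
      simp only [List.length_map]; omega
    simp [hdrop, pvWs]
  | cons i is ih =>
    intro i0 acc his hi0
    have hlt : i0 < (rr.length : Int) := by
      by_contra h
      rw [PySem.List.pyRange_one_eq_nil (by omega)] at his
      exact List.cons_ne_nil _ _ his
    rw [PySem.List.pyRange_one_cons hlt] at his
    injection his with hi2 his'
    subst hi2
    simp only [List.foldl_cons]
    rw [ih (i + 1) _ his' (by omega)]
    rw [calcInnerA_char rr w threshold i hi0 _ 0 rfl le_rfl (by omega)]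
    have hk : i.toNat < (rr.map (pvValid threshold)).length := by
      simp only [List.length_map]; omega
    rw [pvWs_drop_cons _ i.toNat w.toNat hk]
    have h1 : (i + 1).toNat = i.toNat + 1 := by omega
    have h2 : (i + 0).toNat = i.toNat := by omega
    have h3 : (w - 0).toNat = w.toNat := by omega
    rw [h1, h2, h3]
    split_ifs with h <;> push_cast <;> ring

theorem calcPoint_eq_zero_of_lt (rr : List (List (String × Int))) (w threshold : Int)
    (hw : w < 1) : calcPoint rr w threshold = 0 := by
  unfold calcPoint
  have hz : ∀ i, calcInnerA rr w threshold i (PySem.List.pyRange 0 (rr.length : Int) 1) = 0 := by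
    intro i
    exact calcInnerA_nonpos rr w threshold i hw _
      (fun j hj => ((PySem.List.mem_pyRange_one).mp hj).1)
  have hgen : ∀ (is : List Int) (acc : Int),
      is.foldl
        (fun point i =>
          point + calcInnerA rr w threshold i
            (PySem.List.pyRange 0 (rr.length : Int) 1)) acc = acc := by
    intro is
    induction is with
    | nil => intro acc; rfl
    | cons x xs ih =>
      intro acc
      simp only [List.foldl_cons, hz x, add_zero]
      exact ih acc
  exact hgen _ 0

theorem calcPoint_alt_eq_zero_of_lt (rr : List (List (String × Int))) (w threshold : Int)
    (hw : w < 1) : calcPoint_alt rr w threshold = 0 := by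
  unfold calcPoint_alt; rw [if_pos hw]

-- ===== VERDICT (by name: the statement is the Claim_ definition above) =====
theorem calcPoint_spec : Claim_equal_calcPoint := by
  intro rr w threshold _
  unfold Spec_calcPoint
  by_cases hw : w < 1
  · rw [calcPoint_eq_zero_of_lt rr w threshold hw, calcPoint_alt_eq_zero_of_lt rr w threshold hw]
  · rw [calcPoint_alt_eq rr w threshold hw]
    unfold calcPoint
    rw [calcOuter_eq rr w threshold hw _ 0 0 rfl le_rfl]
    have hm : 1 ≤ w.toNat := by omega
    have := pvWs_eq_pvWc w.toNat hm (rr.map (pvValid threshold)) 0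
    simp only [List.replicate_zero, List.nil_append] at this
    rw [show ((rr.map (pvValid threshold)).drop (0 : Int).toNat) = rr.map (pvValid threshold) by simp]
    rw [this]
    have : 0 + 1 - w.toNat = 0 := by omega
    rw [this]
    simp
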